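-- pv_equiv track=rewrite | github.com/laurabetterc/bc-internal-link-analyzer | src/analysis/market_detector.py | _hostname_signal
-- ===== SOURCE A (Python) =====
-- COUNTRY_CODES = {
--     "ar", "au", "at", "be", "br", "bg", "ca", "cl", "co", "cz", "dk", "ee",
--     "fi", "fr", "de", "gr", "hu", "in", "id", "ie", "it", "jp", "lv", "lt",
--     "lu", "mx", "nl", "nz", "no", "pe", "ph", "pl", "pt", "ro", "ru", "sk",
--     "si", "es", "se", "ch", "tr", "ua", "uk", "us", "ve", "za",
-- }
--
-- GEO_TLDS = {
--     ".br": "br", ".fr": "fr", ".de": "de", ".it": "it", ".es": "es",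
--     ".uk": "uk", ".co.uk": "uk", ".us": "us", ".ca": "ca", ".mx": "mx",
--     ".ar": "ar", ".cl": "cl", ".co": "co", ".pe": "pe", ".ve": "ve",
--     ".au": "au", ".nz": "nz", ".jp": "jp", ".in": "in", ".za": "za",
--     ".at": "at", ".be": "be", ".ch": "ch", ".dk": "dk", ".fi": "fi",
--     ".gr": "gr", ".ie": "ie", ".nl": "nl", ".no": "no", ".pl": "pl",
--     ".pt": "pt", ".ro": "ro", ".se": "se", ".tr": "tr", ".ua": "ua",
-- }
--
-- LANG_ONLY_CODES = {"en", "es", "pt", "fr", "de", "it", "ru", "zh", "ja", "ar", "nl", "sv", "no", "da", "fi", "pl", "tr", "el", "cs", "ro"}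
--
-- def _hostname_signal(host: str) -> tuple[str | None, str]:
--     """Inspect a hostname for market signals (TLD + subdomain).
--
--     Returns (market_code, source) or (None, "ambiguous-tld") for generic TLDs.
--     """
--     host = host.lower().lstrip("www.")
--     # Multi-part TLD first
--     for tld, market in sorted(GEO_TLDS.items(), key=lambda kv: -len(kv[0])):
--         if host.endswith(tld):
--             return market, f"geo TLD {tld}"
--
--     # Subdomain like br.site.com / mx.site.com
--     parts = host.split(".")
--     if len(parts) >= 3:
--         sub = parts[0]
--         if sub in COUNTRY_CODES:
--             return sub, f"market subdomain ({sub}.)"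
--         if sub in LANG_ONLY_CODES:
--             return None, f"language-only subdomain ({sub}.) — ambiguous"
--
--     return None, "generic TLD — ambiguous"
-- ===== SOURCE B (Python) =====
-- # Precomputed lookup tables: geo TLDs keyed by the dotted suffix read off the
-- # label list, and a single subdomain -> signal dict merging the country and
-- # language-only code sets (country codes take priority, as in the original).
--
-- _GEO_BY_SUFFIX = {
--     "br": "br", "fr": "fr", "de": "de", "it": "it", "es": "es",
--     "uk": "uk", "co.uk": "uk", "us": "us", "ca": "ca", "mx": "mx",
--     "ar": "ar", "cl": "cl", "co": "co", "pe": "pe", "ve": "ve",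
--     "au": "au", "nz": "nz", "jp": "jp", "in": "in", "za": "za",
--     "at": "at", "be": "be", "ch": "ch", "dk": "dk", "fi": "fi",
--     "gr": "gr", "ie": "ie", "nl": "nl", "no": "no", "pl": "pl",
--     "pt": "pt", "ro": "ro", "se": "se", "tr": "tr", "ua": "ua",
-- }
--
-- _SUB_SIGNAL = {
--     "ar": ("ar", "market subdomain (ar.)"),
--     "au": ("au", "market subdomain (au.)"),
--     "at": ("at", "market subdomain (at.)"),
--     "be": ("be", "market subdomain (be.)"),
--     "br": ("br", "market subdomain (br.)"),
--     "bg": ("bg", "market subdomain (bg.)"),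
--     "ca": ("ca", "market subdomain (ca.)"),
--     "cl": ("cl", "market subdomain (cl.)"),
--     "co": ("co", "market subdomain (co.)"),
--     "cz": ("cz", "market subdomain (cz.)"),
--     "dk": ("dk", "market subdomain (dk.)"),
--     "ee": ("ee", "market subdomain (ee.)"),
--     "fi": ("fi", "market subdomain (fi.)"),
--     "fr": ("fr", "market subdomain (fr.)"),
--     "de": ("de", "market subdomain (de.)"),
--     "gr": ("gr", "market subdomain (gr.)"),
--     "hu": ("hu", "market subdomain (hu.)"),
--     "in": ("in", "market subdomain (in.)"),
--     "id": ("id", "market subdomain (id.)"),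
--     "ie": ("ie", "market subdomain (ie.)"),
--     "it": ("it", "market subdomain (it.)"),
--     "jp": ("jp", "market subdomain (jp.)"),
--     "lv": ("lv", "market subdomain (lv.)"),
--     "lt": ("lt", "market subdomain (lt.)"),
--     "lu": ("lu", "market subdomain (lu.)"),
--     "mx": ("mx", "market subdomain (mx.)"),
--     "nl": ("nl", "market subdomain (nl.)"),
--     "nz": ("nz", "market subdomain (nz.)"),
--     "no": ("no", "market subdomain (no.)"),
--     "pe": ("pe", "market subdomain (pe.)"),
--     "ph": ("ph", "market subdomain (ph.)"),
--     "pl": ("pl", "market subdomain (pl.)"),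
--     "pt": ("pt", "market subdomain (pt.)"),
--     "ro": ("ro", "market subdomain (ro.)"),
--     "ru": ("ru", "market subdomain (ru.)"),
--     "sk": ("sk", "market subdomain (sk.)"),
--     "si": ("si", "market subdomain (si.)"),
--     "es": ("es", "market subdomain (es.)"),
--     "se": ("se", "market subdomain (se.)"),
--     "ch": ("ch", "market subdomain (ch.)"),
--     "tr": ("tr", "market subdomain (tr.)"),
--     "ua": ("ua", "market subdomain (ua.)"),
--     "uk": ("uk", "market subdomain (uk.)"),
--     "us": ("us", "market subdomain (us.)"),
--     "ve": ("ve", "market subdomain (ve.)"),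
--     "za": ("za", "market subdomain (za.)"),
--     "en": (None, "language-only subdomain (en.) — ambiguous"),
--     "zh": (None, "language-only subdomain (zh.) — ambiguous"),
--     "ja": (None, "language-only subdomain (ja.) — ambiguous"),
--     "sv": (None, "language-only subdomain (sv.) — ambiguous"),
--     "da": (None, "language-only subdomain (da.) — ambiguous"),
--     "el": (None, "language-only subdomain (el.) — ambiguous"),
--     "cs": (None, "language-only subdomain (cs.) — ambiguous"),
-- }
--
--
-- def _geo(labels):
--     """Longest-match geo TLD: try the 2-label suffix, then the last label."""
--     for n in (2, 1):
--         if len(labels) > n: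
--             suffix = ".".join(labels[-n:])
--             hit = _GEO_BY_SUFFIX.get(suffix)
--             if hit is not None:
--                 return hit, "geo TLD ." + suffix
--     return None
--
--
-- def _sub(labels):
--     """Subdomain signal for hosts with at least three labels."""
--     if len(labels) >= 3:
--         return _SUB_SIGNAL.get(labels[0])
--     return None
--
--
-- def _hostname_signal(host: str) -> tuple:
--     """Inspect a hostname for market signals (TLD + subdomain)."""
--     labels = host.lower().lstrip("www.").split(".")
--     return _geo(labels) or _sub(labels) or (None, "generic TLD — ambiguous")
-- ===== Notes on version B (the rewrite author's own statement) =====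
-- stated objective: alternative
-- what changed: A sorts the 35-entry GEO_TLDS table by key length on every call and runs endswith against each key, then tests the subdomain against two code sets while formatting the message; B splits the host once and does at most two O(1) dict lookups of the undotted suffixes built from the last one or two labels (2-label first, preserving longest-match), and replaces both set-membership branches by a single lookup in one precomputed subdomain-to-signal table with ready-made messages.
import Mathlib
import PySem

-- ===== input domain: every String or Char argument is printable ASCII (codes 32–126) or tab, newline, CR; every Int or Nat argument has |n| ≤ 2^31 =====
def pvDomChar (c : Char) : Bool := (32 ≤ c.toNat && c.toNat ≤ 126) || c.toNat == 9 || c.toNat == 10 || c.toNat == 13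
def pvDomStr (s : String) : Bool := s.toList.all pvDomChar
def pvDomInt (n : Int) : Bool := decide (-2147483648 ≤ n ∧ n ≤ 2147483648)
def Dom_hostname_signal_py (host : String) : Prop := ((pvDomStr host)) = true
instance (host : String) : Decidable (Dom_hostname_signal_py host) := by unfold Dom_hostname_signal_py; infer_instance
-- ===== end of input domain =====

set_option maxRecDepth 262144

-- B replaces A's per-call sort + endswith-scan of GEO_TLDS by direct lookups of the dotted
-- suffixes read off the label list, and the two set-membership subdomain branches by one
-- precomputed subdomain→signal table; same return value everywhere (proved below).

-- ===== PORT A =====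
-- module constants (the Python sets are only used for membership, their iteration order is never consumed)
def pvCountryCodes : PySem.Set (List Char) :=
  PySem.Set.ofList (["ar","au","at","be","br","bg","ca","cl","co","cz","dk","ee",
    "fi","fr","de","gr","hu","in","id","ie","it","jp","lv","lt",
    "lu","mx","nl","nz","no","pe","ph","pl","pt","ro","ru","sk",
    "si","es","se","ch","tr","ua","uk","us","ve","za"].map String.toList)

def pvGeoTlds : PySem.Dict (List Char) (List Char) :=
  PySem.Dict.ofList (([(".br","br"),(".fr","fr"),(".de","de"),(".it","it"),(".es","es"),
   (".uk","uk"),(".co.uk","uk"),(".us","us"),(".ca","ca"),(".mx","mx"),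
   (".ar","ar"),(".cl","cl"),(".co","co"),(".pe","pe"),(".ve","ve"),
   (".au","au"),(".nz","nz"),(".jp","jp"),(".in","in"),(".za","za"),
   (".at","at"),(".be","be"),(".ch","ch"),(".dk","dk"),(".fi","fi"),
   (".gr","gr"),(".ie","ie"),(".nl","nl"),(".no","no"),(".pl","pl"),
   (".pt","pt"),(".ro","ro"),(".se","se"),(".tr","tr"),(".ua","ua")] : List (String × String)).map
    (fun kv => (kv.1.toList, kv.2.toList)))

def pvLangOnly : PySem.Set (List Char) :=
  PySem.Set.ofList (["en","es","pt","fr","de","it","ru","zh","ja","ar","nl","sv","no","da","fi","pl","tr","el","cs","ro"].map String.toList)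

-- host.lstrip("www."): drop leading chars that occur in "www." (exact port of str.lstrip(chars))
def pvLstripWWW (s : List Char) : List Char := s.dropWhile (fun c => ("www.".toList).contains c)

-- A's for-loop over sorted(GEO_TLDS.items(), key=-len): return at the first tld with host.endswith(tld)
def pvGeoLoop (h : List Char) : List (List Char × List Char) → Option (Option String × String)
  | [] => none
  | (tld, market) :: rest =>
    if PySem.Chars.endswith h tld then
      some (some (String.ofList market), String.ofList ("geo TLD ".toList ++ tld))
    else pvGeoLoop h rest

def hostname_signal_py (host : String) : Option String × String :=
  let h := pvLstripWWW (PySem.Chars.lower host.toList)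
  match pvGeoLoop h (PySem.List.sorted (PySem.Dict.items pvGeoTlds) (fun kv => -(kv.1.length : Int))) with
  | some r => r
  | none =>
    let parts := PySem.Chars.splitOn h ['.']
    if 3 ≤ parts.length then
      let sub := parts.headI  -- parts[0]; str.split(".") always returns a nonempty list
      if pvCountryCodes.contains sub then
        (some (String.ofList sub), String.ofList ("market subdomain (".toList ++ sub ++ ".)".toList))
      else if pvLangOnly.contains sub then
        (none, String.ofList ("language-only subdomain (".toList ++ sub ++ ".) — ambiguous".toList))
      else (none, "generic TLD — ambiguous")
    else (none, "generic TLD — ambiguous")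

-- ===== PORT B =====
-- B's precomputed tables: geo TLDs keyed by the undotted suffix, and one merged
-- subdomain → (market?, source) signal table (country codes take priority).
def pvGeoBySuffix : PySem.Dict (List Char) (List Char) :=
  PySem.Dict.ofList (([("br","br"),("fr","fr"),("de","de"),("it","it"),("es","es"),
   ("uk","uk"),("co.uk","uk"),("us","us"),("ca","ca"),("mx","mx"),
   ("ar","ar"),("cl","cl"),("co","co"),("pe","pe"),("ve","ve"),
   ("au","au"),("nz","nz"),("jp","jp"),("in","in"),("za","za"),
   ("at","at"),("be","be"),("ch","ch"),("dk","dk"),("fi","fi"),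
   ("gr","gr"),("ie","ie"),("nl","nl"),("no","no"),("pl","pl"),
   ("pt","pt"),("ro","ro"),("se","se"),("tr","tr"),("ua","ua")] : List (String × String)).map
    (fun kv => (kv.1.toList, kv.2.toList)))

def pvSubSignal : PySem.Dict (List Char) (Option String × String) :=
  PySem.Dict.ofList (([
    ("ar", (some "ar", "market subdomain (ar.)")),
    ("au", (some "au", "market subdomain (au.)")),
    ("at", (some "at", "market subdomain (at.)")),
    ("be", (some "be", "market subdomain (be.)")),
    ("br", (some "br", "market subdomain (br.)")),
    ("bg", (some "bg", "market subdomain (bg.)")),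
    ("ca", (some "ca", "market subdomain (ca.)")),
    ("cl", (some "cl", "market subdomain (cl.)")),
    ("co", (some "co", "market subdomain (co.)")),
    ("cz", (some "cz", "market subdomain (cz.)")),
    ("dk", (some "dk", "market subdomain (dk.)")),
    ("ee", (some "ee", "market subdomain (ee.)")),
    ("fi", (some "fi", "market subdomain (fi.)")),
    ("fr", (some "fr", "market subdomain (fr.)")),
    ("de", (some "de", "market subdomain (de.)")),
    ("gr", (some "gr", "market subdomain (gr.)")),
    ("hu", (some "hu", "market subdomain (hu.)")),
    ("in", (some "in", "market subdomain (in.)")),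
    ("id", (some "id", "market subdomain (id.)")),
    ("ie", (some "ie", "market subdomain (ie.)")),
    ("it", (some "it", "market subdomain (it.)")),
    ("jp", (some "jp", "market subdomain (jp.)")),
    ("lv", (some "lv", "market subdomain (lv.)")),
    ("lt", (some "lt", "market subdomain (lt.)")),
    ("lu", (some "lu", "market subdomain (lu.)")),
    ("mx", (some "mx", "market subdomain (mx.)")),
    ("nl", (some "nl", "market subdomain (nl.)")),
    ("nz", (some "nz", "market subdomain (nz.)")),
    ("no", (some "no", "market subdomain (no.)")),
    ("pe", (some "pe", "market subdomain (pe.)")),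
    ("ph", (some "ph", "market subdomain (ph.)")),
    ("pl", (some "pl", "market subdomain (pl.)")),
    ("pt", (some "pt", "market subdomain (pt.)")),
    ("ro", (some "ro", "market subdomain (ro.)")),
    ("ru", (some "ru", "market subdomain (ru.)")),
    ("sk", (some "sk", "market subdomain (sk.)")),
    ("si", (some "si", "market subdomain (si.)")),
    ("es", (some "es", "market subdomain (es.)")),
    ("se", (some "se", "market subdomain (se.)")),
    ("ch", (some "ch", "market subdomain (ch.)")),
    ("tr", (some "tr", "market subdomain (tr.)")),
    ("ua", (some "ua", "market subdomain (ua.)")),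
    ("uk", (some "uk", "market subdomain (uk.)")),
    ("us", (some "us", "market subdomain (us.)")),
    ("ve", (some "ve", "market subdomain (ve.)")),
    ("za", (some "za", "market subdomain (za.)")),
    ("en", (none, "language-only subdomain (en.) — ambiguous")),
    ("zh", (none, "language-only subdomain (zh.) — ambiguous")),
    ("ja", (none, "language-only subdomain (ja.) — ambiguous")),
    ("sv", (none, "language-only subdomain (sv.) — ambiguous")),
    ("da", (none, "language-only subdomain (da.) — ambiguous")),
    ("el", (none, "language-only subdomain (el.) — ambiguous")),
    ("cs", (none, "language-only subdomain (cs.) — ambiguous"))] :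
      List (String × (Option String × String))).map (fun kv => (kv.1.toList, kv.2)))

-- B's _geo: for n in (2, 1): if len(labels) > n, look up ".".join(labels[-n:])
def pvGeo (labels : List (List Char)) : List Int → Option (Option String × String)
  | [] => none
  | n :: ns =>
    if n < (labels.length : Int) then
      let suffix := PySem.Chars.join ['.'] (PySem.List.slice labels (some (-n)) none)
      match PySem.Dict.get? pvGeoBySuffix suffix with
      | some hit => some (some (String.ofList hit), String.ofList ("geo TLD .".toList ++ suffix))
      | none => pvGeo labels ns
    else pvGeo labels ns

-- B's _sub: one table lookup of labels[0] when there are at least three labels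
def pvSub (labels : List (List Char)) : Option (Option String × String) :=
  if 3 ≤ labels.length then PySem.Dict.get? pvSubSignal labels.headI else none

def hostname_signal_py_alt (host : String) : Option String × String :=
  let labels := PySem.Chars.splitOn ((PySem.Chars.lower host.toList).dropWhile
    (fun c => ("www.".toList).contains c)) ['.']
  (((pvGeo labels [2, 1]).orElse (fun _ => pvSub labels)).getD (none, "generic TLD — ambiguous"))

-- ===== PRECONDITION & SPEC =====
def Spec_hostname_signal_py (host : String) (out : Option String × String) : Prop := out = hostname_signal_py_alt host
instance (host : String) (out : Option String × String) : Decidable (Spec_hostname_signal_py host out) := by unfold Spec_hostname_signal_py; infer_instance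

-- ===== CLAIM (what is proved, stated in full; the proofs are below) =====
def Claim_equal_hostname_signal_py : Prop := ∀ (host : String), Dom_hostname_signal_py host → Spec_hostname_signal_py host (hostname_signal_py host)

-- ===== LEMMAS AND PROOFS =====

-- a simple structural model of str.split(".")
def pvSplit : List Char → List (List Char)
  | [] => [[]]
  | c :: t =>
    if c = '.' then [] :: pvSplit t
    else match pvSplit t with
      | p :: ps => (c :: p) :: ps
      | [] => [[c]]

theorem pvSplit_ne_nil (l : List Char) : pvSplit l ≠ [] := by
  induction l with
  | nil => simp [pvSplit]
  | cons c t ih =>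
    simp only [pvSplit]
    split
    · simp
    · split
      · simp
      · simp

theorem pvSplit_go (fuel : Nat) (l cur : List Char) (acc : List (List Char))
    (hf : l.length < fuel) :
    PySem.Chars.splitOn.go ['.'] fuel l cur acc
      = acc.reverse ++ (cur.reverse ++ (pvSplit l).headI) :: (pvSplit l).tail := by
  induction fuel generalizing l cur acc with
  | zero => omega
  | succ fuel ih =>
    cases l with
    | nil => simp [PySem.Chars.splitOn.go, pvSplit]
    | cons c rest =>
      by_cases hc : c = '.'
      · subst hc
        have hpre : ['.'].isPrefixOf ('.' :: rest) = true := by simp [List.isPrefixOf]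
        rw [show PySem.Chars.splitOn.go ['.'] (fuel+1) ('.' :: rest) cur acc
              = PySem.Chars.splitOn.go ['.'] fuel rest [] (cur.reverse :: acc) by
              simp [PySem.Chars.splitOn.go, hpre]]
        rw [ih rest [] (cur.reverse :: acc) (by simp at hf ⊢; omega)]
        have hne := pvSplit_ne_nil rest
        simp only [pvSplit]
        cases hps : pvSplit rest with
        | nil => exact absurd hps hne
        | cons p ps => simp
      · have hpre : ['.'].isPrefixOf (c :: rest) = false := by
          simp [List.isPrefixOf]; exact fun h => absurd h.symm hc
        rw [show PySem.Chars.splitOn.go ['.'] (fuel+1) (c :: rest) cur acc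
              = PySem.Chars.splitOn.go ['.'] fuel rest (c :: cur) acc by
              simp [PySem.Chars.splitOn.go, hpre]]
        rw [ih rest (c :: cur) acc (by simp at hf ⊢; omega)]
        have hne := pvSplit_ne_nil rest
        simp only [pvSplit, if_neg hc]
        cases hps : pvSplit rest with
        | nil => exact absurd hps hne
        | cons p ps => simp

theorem splitOn_eq_pvSplit (l : List Char) : PySem.Chars.splitOn l ['.'] = pvSplit l := by
  rw [PySem.Chars.splitOn, pvSplit_go (l.length + 1) l [] [] (by omega)]
  have hne := pvSplit_ne_nil l
  cases hps : pvSplit l with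
  | nil => exact absurd hps hne
  | cons p ps => simp

theorem pvSplit_dotfree {l : List Char} {p : List Char} (hp : p ∈ pvSplit l) : '.' ∉ p := by
  induction l generalizing p with
  | nil => simp [pvSplit] at hp; simp [hp]
  | cons c t ih =>
    simp only [pvSplit] at hp
    by_cases hc : c = '.'
    · rw [if_pos hc] at hp
      rcases List.mem_cons.mp hp with h | h
      · simp [h]
      · exact ih h
    · rw [if_neg hc] at hp
      cases hps : pvSplit t with
      | nil => exact absurd hps (pvSplit_ne_nil t)
      | cons q qs =>
        rw [hps] at hp
        rcases List.mem_cons.mp hp with h | h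
        · subst h
          intro hm
          rcases List.mem_cons.mp hm with h | h
          · exact hc h.symm
          · exact ih (by rw [hps]; exact List.mem_cons_self) h
        · exact ih (by rw [hps]; exact List.mem_cons_of_mem _ h)

theorem pv_intercalate_cons_cons (x y : List Char) (zs : List (List Char)) :
    List.intercalate ['.'] (x :: y :: zs) = x ++ '.' :: List.intercalate ['.'] (y :: zs) := by
  simp [List.intercalate, List.intersperse]

theorem pvSplit_of_dotfree (b : List Char) (hb : '.' ∉ b) : pvSplit b = [b] := by
  induction b with
  | nil => simp [pvSplit]
  | cons c t ih =>
    simp only [List.mem_cons, not_or] at hb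
    have hc : ¬ (c = '.') := fun h => hb.1 h.symm
    simp only [pvSplit, if_neg hc, ih hb.2]

theorem pvSplit_append (a b : List Char) (hb : '.' ∉ b) :
    pvSplit (a ++ '.' :: b) = pvSplit a ++ [b] := by
  induction a with
  | nil => simp [pvSplit, pvSplit_of_dotfree b hb]
  | cons c t ih =>
    by_cases hc : c = '.'
    · simp only [List.cons_append, pvSplit, if_pos hc, ih, List.cons_append]
    · simp only [List.cons_append, pvSplit, if_neg hc, ih]
      cases hps : pvSplit t with
      | nil => exact absurd hps (pvSplit_ne_nil t)
      | cons q qs => simp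

theorem pvSplit_join (l : List Char) : List.intercalate ['.'] (pvSplit l) = l := by
  induction l with
  | nil => simp [pvSplit, List.intercalate]
  | cons c t ih =>
    by_cases hc : c = '.'
    · subst hc
      rw [show pvSplit ('.' :: t) = [] :: pvSplit t by simp [pvSplit]]
      cases hps : pvSplit t with
      | nil => exact absurd hps (pvSplit_ne_nil t)
      | cons q qs =>
        rw [hps] at ih
        rw [pv_intercalate_cons_cons, List.nil_append, ih]
    · simp only [pvSplit, if_neg hc]
      cases hps : pvSplit t with
      | nil => exact absurd hps (pvSplit_ne_nil t)
      | cons q qs =>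
        rw [hps] at ih
        cases qs with
        | nil => simp only [List.intercalate] at ih ⊢; simpa using congrArg (c :: ·) ih
        | cons q' qs' =>
          rw [pv_intercalate_cons_cons] at ih ⊢
          rw [List.cons_append, ih]

theorem intercalate_concat (qs : List (List Char)) (w : List Char) (h : qs ≠ []) :
    List.intercalate ['.'] (qs ++ [w]) = List.intercalate ['.'] qs ++ '.' :: w := by
  induction qs with
  | nil => exact absurd rfl h
  | cons q qs ih =>
    cases qs with
    | nil => rw [List.cons_append, List.nil_append, pv_intercalate_cons_cons]; simp [List.intercalate]
    | cons q' qs' =>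
      rw [List.cons_append, List.cons_append, pv_intercalate_cons_cons, pv_intercalate_cons_cons,
        ← List.cons_append, ih (by simp), List.append_assoc, List.cons_append]

-- one-label suffix characterisation
theorem suffix_one (l w : List Char) (hw : '.' ∉ w) :
    ('.' :: w) <:+ l ↔ ∃ qs, qs ≠ [] ∧ pvSplit l = qs ++ [w] := by
  constructor
  · rintro ⟨u, rfl⟩
    exact ⟨pvSplit u, pvSplit_ne_nil u, pvSplit_append u w hw⟩
  · rintro ⟨qs, hq, hps⟩
    refine ⟨List.intercalate ['.'] qs, ?_⟩
    have := pvSplit_join l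
    rw [hps, intercalate_concat qs w hq] at this
    exact this

-- two-label suffix characterisation
theorem suffix_two (l w1 w2 : List Char) (h1 : '.' ∉ w1) (h2 : '.' ∉ w2) :
    (('.' :: w1) ++ ('.' :: w2)) <:+ l ↔ ∃ qs, qs ≠ [] ∧ pvSplit l = qs ++ [w1, w2] := by
  constructor
  · rintro ⟨u, rfl⟩
    refine ⟨pvSplit u, pvSplit_ne_nil u, ?_⟩
    rw [show u ++ (('.' :: w1) ++ ('.' :: w2)) = (u ++ '.' :: w1) ++ '.' :: w2 by
      simp [List.append_assoc]]
    rw [pvSplit_append _ w2 h2, pvSplit_append u w1 h1, List.append_assoc]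
    rfl
  · rintro ⟨qs, hq, hps⟩
    refine ⟨List.intercalate ['.'] qs, ?_⟩
    have := pvSplit_join l
    rw [hps, show qs ++ [w1, w2] = (qs ++ [w1]) ++ [w2] by simp,
      intercalate_concat _ w2 (by simp), intercalate_concat qs w1 hq] at this
    rw [← this]
    simp

theorem seplast_inj {w1 a : List Char} (hw : '.' ∉ w1) (ha : '.' ∉ a) (w2 b : List Char) :
    w1 ++ '.' :: w2 = a ++ '.' :: b ↔ w1 = a ∧ w2 = b := by
  constructor
  · intro h
    induction w1 generalizing a with
    | nil =>
      cases a with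
      | nil => simpa using h
      | cons c a' =>
        rw [List.nil_append, List.cons_append, List.cons.injEq] at h
        exact absurd (h.1 ▸ List.mem_cons_self) ha
    | cons c w1' ih =>
      cases a with
      | nil =>
        rw [List.nil_append, List.cons_append, List.cons.injEq] at h
        exact absurd (h.1.symm ▸ List.mem_cons_self) hw
      | cons c' a' =>
        rw [List.cons_append, List.cons_append, List.cons.injEq] at h
        have := ih (fun hm => hw (List.mem_cons_of_mem _ hm))
          (fun hm => ha (List.mem_cons_of_mem _ hm)) h.2
        exact ⟨by rw [h.1, this.1], this.2⟩
  · rintro ⟨rfl, rfl⟩; rfl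

-- the sorted table: ".co.uk" first, then the 34 one-label keys in dict order
def pvTail34 : List (List Char × List Char) :=
  ([(".br","br"),(".fr","fr"),(".de","de"),(".it","it"),(".es","es"),
   (".uk","uk"),(".us","us"),(".ca","ca"),(".mx","mx"),
   (".ar","ar"),(".cl","cl"),(".co","co"),(".pe","pe"),(".ve","ve"),
   (".au","au"),(".nz","nz"),(".jp","jp"),(".in","in"),(".za","za"),
   (".at","at"),(".be","be"),(".ch","ch"),(".dk","dk"),(".fi","fi"),
   (".gr","gr"),(".ie","ie"),(".nl","nl"),(".no","no"),(".pl","pl"),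
   (".pt","pt"),(".ro","ro"),(".se","se"),(".tr","tr"),(".ua","ua")] : List (String × String)).map
    (fun kv => (kv.1.toList, kv.2.toList))

theorem sorted_table_eq :
    PySem.List.sorted (PySem.Dict.items pvGeoTlds) (fun kv => -(kv.1.length : Int))
      = (".co.uk".toList, "uk".toList) :: pvTail34 := by
  set_option maxRecDepth 8192 in decide

-- the key shape every GEO_TLDS key has: a leading dot, and (except ".co.uk") a dot-free label
def pvKeyShape (kv : List Char × List Char) : Prop :=
  kv.1 = '.' :: kv.1.tail ∧ ('.' ∉ kv.1.tail ∨ kv.1 = ".co.uk".toList)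

theorem keyShape_tail34 : ∀ kv ∈ pvTail34, pvKeyShape kv ∧ '.' ∉ kv.1.tail := by
  unfold pvKeyShape
  set_option maxRecDepth 8192 in decide

-- A's endswith-scan, isolated per candidate key (same left-to-right order as the loop)
def pvScan (suf : List Char) : List (List Char × List Char) → Option (Option String × String)
  | [] => none
  | (k, m) :: rest =>
    if k == suf then some (some (String.ofList m), String.ofList ("geo TLD ".toList ++ suf))
    else pvScan suf rest

-- B's dict lookup written as the same left-to-right scan shape, over B's undotted keys
def pvScanB (w : List Char) : List (List Char × List Char) → Option (Option String × String)
  | [] => none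
  | (k, m) :: rest =>
    if k == w then some (some (String.ofList m), String.ofList ("geo TLD .".toList ++ w))
    else pvScanB w rest

theorem getB_eq_scanB_aux (w : List Char) (kvs : List (List Char × List Char)) :
    (match Option.map (fun x => x.2) (List.find? (fun p => p.1 == w) kvs) with
     | some hit => some (some (String.ofList hit), String.ofList ("geo TLD .".toList ++ w))
     | none => (none : Option (Option String × String)))
      = pvScanB w kvs := by
  induction kvs with
  | nil => simp [pvScanB]
  | cons kv rest ih =>
    obtain ⟨k, m⟩ := kv
    by_cases hk : (k == w) = true
    · rw [List.find?_cons_of_pos (by simpa using hk)]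
      simp only [pvScanB, if_pos hk, Option.map_some]
    · rw [List.find?_cons_of_neg (by simpa using hk)]
      simp only [pvScanB, if_neg hk]
      exact ih

set_option maxRecDepth 8192 in
theorem getB_eq_scanB (w : List Char) :
    (match PySem.Dict.get? pvGeoBySuffix w with
     | some hit => some (some (String.ofList hit), String.ofList ("geo TLD .".toList ++ w))
     | none => (none : Option (Option String × String)))
      = pvScanB w (PySem.Dict.items pvGeoBySuffix) := by
  unfold PySem.Dict.get?
  exact getB_eq_scanB_aux w _

-- dropping a B-key that cannot match does not change the B scan
theorem scanB_middle (w : List Char) (X Y : List (List Char × List Char))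
    (kv : List Char × List Char) (hk : (kv.1 == w) = false) :
    pvScanB w (X ++ kv :: Y) = pvScanB w (X ++ Y) := by
  induction X with
  | nil =>
    obtain ⟨k', m'⟩ := kv
    simp only [List.nil_append, pvScanB]
    rw [if_neg (by simpa using hk)]
  | cons kv' rest ih =>
    obtain ⟨k', m'⟩ := kv'
    simp only [List.cons_append, pvScanB, ih]

-- the two message spellings agree: "geo TLD " ++ "." ++ w  =  "geo TLD ." ++ w
theorem geo_msg_eq (w : List Char) :
    ("geo TLD ".toList ++ ('.' :: w)) = ("geo TLD .".toList ++ w) := by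
  rw [show "geo TLD .".toList = "geo TLD ".toList ++ ['.'] by decide, List.append_assoc]
  rfl

-- A's scan over dotted keys is B's scan over the same keys with the dot stripped
theorem scanA_eq_scanB (w : List Char) (l : List (List Char × List Char))
    (hl : ∀ kv ∈ l, kv.1 = '.' :: kv.1.tail) :
    pvScan ('.' :: w) l = pvScanB w (l.map (fun kv => (kv.1.tail, kv.2))) := by
  induction l with
  | nil => rfl
  | cons kv rest ih =>
    obtain ⟨k, m⟩ := kv
    have hshape : k = '.' :: k.tail := hl (k, m) List.mem_cons_self
    have hbeq : (k == ('.' :: w)) = (k.tail == w) := by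
      conv_lhs => rw [hshape]
      simp [List.cons_beq_cons]
    simp only [List.map_cons, pvScan, pvScanB, hbeq]
    by_cases hk : (k.tail == w) = true
    · rw [if_pos hk, if_pos hk, geo_msg_eq]
    · rw [if_neg hk, if_neg hk]
      exact ih (fun kv h => hl kv (List.mem_cons_of_mem _ h))

-- A's loop finds nothing when the host has no dot at all
theorem geoLoop_none_of_single (l x : List Char) (hx : pvSplit l = [x])
    (kvs : List (List Char × List Char)) (hk : ∀ kv ∈ kvs, pvKeyShape kv) :
    pvGeoLoop l kvs = none := by
  have hl : l = x := by
    have := pvSplit_join l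
    rw [hx] at this
    simpa [List.intercalate] using this.symm
  have hdot : '.' ∉ l := hl ▸ pvSplit_dotfree (hx ▸ List.mem_cons_self)
  induction kvs with
  | nil => rfl
  | cons kv rest ih =>
    obtain ⟨k, m⟩ := kv
    have hshape : k = '.' :: k.tail := (hk (k, m) List.mem_cons_self).1
    have hends : PySem.Chars.endswith l k = false := by
      rw [Bool.eq_false_iff]
      intro h
      have hsuf := (PySem.Chars.endswith_iff l k).mp h
      have hmem : '.' ∈ k := by rw [hshape]; exact List.mem_cons_self
      exact hdot (hsuf.subset hmem)
    simp only [pvGeoLoop, hends, Bool.false_eq_true, if_false]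
    exact ih (fun kv h => hk kv (List.mem_cons_of_mem _ h))

-- A's loop over one-label keys is the scan with the host's last label
theorem geoLoop_eq_scan (l : List Char) (qs : List (List Char)) (w : List Char)
    (hq : qs ≠ []) (hps : pvSplit l = qs ++ [w]) (hw : '.' ∉ w)
    (kvs : List (List Char × List Char)) (hk : ∀ kv ∈ kvs, pvKeyShape kv ∧ '.' ∉ kv.1.tail) :
    pvGeoLoop l kvs = pvScan ('.' :: w) kvs := by
  induction kvs with
  | nil => rfl
  | cons kv rest ih =>
    obtain ⟨k, m⟩ := kv
    obtain ⟨⟨hshape0, _⟩, hkt0⟩ := hk (k, m) List.mem_cons_self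
    have hshape : k = '.' :: k.tail := hshape0
    have hkt : '.' ∉ k.tail := hkt0
    by_cases hkw : k.tail = w
    · have hends : PySem.Chars.endswith l k = true := by
        rw [PySem.Chars.endswith_iff, hshape, hkw]
        exact (suffix_one l w hw).mpr ⟨qs, hq, hps⟩
      have hbeq : (k == ('.' :: w)) = true := by
        rw [beq_iff_eq, hshape, hkw]
      simp only [pvGeoLoop, pvScan, hends, hbeq, if_true]
      rw [show k = '.' :: w from hshape.trans (by rw [hkw])]
    · have hends : PySem.Chars.endswith l k = false := by
        rw [Bool.eq_false_iff]
        intro h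
        have hsuf := (PySem.Chars.endswith_iff l k).mp h
        rw [hshape] at hsuf
        obtain ⟨qs', hq', hps'⟩ := (suffix_one l k.tail hkt).mp hsuf
        rw [hps] at hps'
        have hlast : some w = some k.tail := by
          rw [← List.getLast?_concat (l := qs), ← List.getLast?_concat (l := qs'), hps']
        exact hkw (by injection hlast with h'; exact h'.symm)
      have hbeq : (k == ('.' :: w)) = false := by
        rw [beq_eq_false_iff_ne]
        intro h
        exact hkw (by rw [hshape] at h; injection h with _ h')
      simp only [pvGeoLoop, pvScan, hends, hbeq, Bool.false_eq_true, if_false]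
      exact ih (fun kv h => hk kv (List.mem_cons_of_mem _ h))

theorem keyShape_sorted :
    ∀ kv ∈ ((".co.uk".toList, "uk".toList) :: pvTail34), pvKeyShape kv := by
  unfold pvKeyShape
  set_option maxRecDepth 8192 in decide

-- B's items are the dot-stripped A keys, with "co.uk" where A's sorted order put ".co.uk"
theorem itemsB_decomp :
    PySem.Dict.items pvGeoBySuffix
      = ((pvTail34.map (fun kv => (kv.1.tail, kv.2))).take 6)
        ++ ("co.uk".toList, "uk".toList)
          :: ((pvTail34.map (fun kv => (kv.1.tail, kv.2))).drop 6) := by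
  set_option maxRecDepth 8192 in decide

theorem couk_ne_plain (w : List Char) (hw : '.' ∉ w) :
    (("co.uk".toList : List Char) == w) = false := by
  rw [beq_eq_false_iff_ne]
  intro h
  exact hw (h ▸ (by decide : '.' ∈ "co.uk".toList))

-- the central one-label step: A's loop over the 34 plain keys = B's dict lookup of w
theorem one_label_eq (l : List Char) (qs : List (List Char)) (w : List Char)
    (hq : qs ≠ []) (hps : pvSplit l = qs ++ [w]) (hw : '.' ∉ w) :
    pvGeoLoop l pvTail34
      = (match PySem.Dict.get? pvGeoBySuffix w with
         | some hit => some (some (String.ofList hit), String.ofList ("geo TLD .".toList ++ w))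
         | none => none) := by
  rw [getB_eq_scanB, itemsB_decomp,
    scanB_middle w _ _ _ (couk_ne_plain w hw), List.take_append_drop,
    ← scanA_eq_scanB w pvTail34 (fun kv h => ((keyShape_tail34 kv h).1).1)]
  exact geoLoop_eq_scan l qs w hq hps hw _ keyShape_tail34

-- no two-label suffix other than "co.uk" is a B key
theorem getB_two_none (w1 w2 : List Char) (h1 : '.' ∉ w1)
    (hno : ¬ (w1 = "co".toList ∧ w2 = "uk".toList)) :
    PySem.Dict.get? pvGeoBySuffix (w1 ++ '.' :: w2) = none := by
  have hkeys : ∀ kv ∈ PySem.Dict.items pvGeoBySuffix,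
      '.' ∉ kv.1 ∨ kv.1 = "co.uk".toList := by
    set_option maxRecDepth 8192 in decide
  unfold PySem.Dict.get?
  rw [List.find?_eq_none.mpr, Option.map_none]
  intro p hp
  simp only [beq_iff_eq]
  intro hcontra
  rcases hkeys p hp with hdf | hcouk
  · exact hdf (hcontra ▸ List.mem_append_right _ List.mem_cons_self)
  · rw [hcouk, show ("co.uk".toList : List Char) = "co".toList ++ '.' :: "uk".toList by decide] at hcontra
    exact hno (((seplast_inj (by decide) h1 "uk".toList w2).mp hcontra).imp Eq.symm Eq.symm)

-- the last label of qs ++ [w], as B's labels[-1:] slice computes it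
theorem drop_concat_last (qs : List (List Char)) (w : List Char) :
    (qs ++ [w]).drop ((qs ++ [w]).length - 1) = [w] := by
  simp

theorem join_single (w : List Char) : PySem.Chars.join ['.'] [w] = w := by
  simp [PySem.Chars.join, List.intercalate, List.intersperse]

theorem join_pair (w1 w2 : List Char) :
    PySem.Chars.join ['.'] [w1, w2] = w1 ++ '.' :: w2 := by
  simp [PySem.Chars.join, List.intercalate, List.intersperse]

theorem concat2_inj {ts rs : List (List Char)} {a b c d : List Char}
    (h : ts ++ [a, b] = rs ++ [c, d]) : a = c ∧ b = d := by
  have h' : (ts ++ [a]) ++ [b] = (rs ++ [c]) ++ [d] := by simpa using h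
  have hb : b = d := by
    have := congrArg List.getLast? h'
    simpa [List.getLast?_concat] using this
  subst hb
  have h2 : ts ++ [a] = rs ++ [c] := List.append_cancel_right h'
  have ha : a = c := by
    have := congrArg List.getLast? h2
    simpa [List.getLast?_concat] using this
  exact ⟨ha, rfl⟩

-- geo phase: A's sorted endswith-loop equals B's two suffix lookups
theorem geo_eq (h : List Char) :
    (pvGeoLoop h (PySem.List.sorted (PySem.Dict.items pvGeoTlds) (fun kv => -(kv.1.length : Int))) : Option (Option String × String))
      = pvGeo (pvSplit h) [2, 1] := by
  rw [sorted_table_eq]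
  rcases List.eq_nil_or_concat (pvSplit h) with hnil | ⟨qs, w, hps⟩
  · exact absurd hnil (pvSplit_ne_nil h)
  rw [List.concat_eq_append] at hps
  have hw : '.' ∉ w := pvSplit_dotfree (by rw [hps]; exact List.mem_append_right _ List.mem_cons_self)
  rcases List.eq_nil_or_concat qs with rfl | ⟨ts, w1, hqs⟩
  · -- host has no dot: split is a single label, neither n = 2 nor n = 1 fires
    rw [List.nil_append] at hps
    rw [geoLoop_none_of_single h w hps _ keyShape_sorted, hps]
    simp [pvGeo]
  rw [List.concat_eq_append] at hqs
  subst hqs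
  have hw1 : '.' ∉ w1 :=
    pvSplit_dotfree (by rw [hps]; exact List.mem_append_left _ (List.mem_append_right _ List.mem_cons_self))
  have hps' : pvSplit h = ts ++ [w1, w] := by rw [hps]; simp
  rcases List.eq_nil_or_concat ts with rfl | ⟨us, u, hts0⟩
  · -- exactly two labels: only the n = 1 lookup fires
    simp only [List.nil_append] at hps'
    have hcouk : PySem.Chars.endswith h ".co.uk".toList = false := by
      rw [Bool.eq_false_iff]
      intro hends
      have hsuf := (PySem.Chars.endswith_iff _ _).mp hends
      rw [show (".co.uk".toList : List Char) = ('.' :: "co".toList) ++ ('.' :: "uk".toList) by decide] at hsuf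
      obtain ⟨rs, hrs, heq⟩ := (suffix_two h _ _ (by decide) (by decide)).mp hsuf
      have h4 : (2 : Nat) = rs.length + 2 := by
        have := congrArg List.length (hps'.symm.trans heq)
        simpa using this
      exact hrs (List.length_eq_zero_iff.mp (by omega))
    rw [show pvGeoLoop h ((".co.uk".toList, "uk".toList) :: pvTail34) = pvGeoLoop h pvTail34 by
      simp only [pvGeoLoop, hcouk, Bool.false_eq_true, if_false]]
    rw [one_label_eq h [w1] w (by simp) (by simpa using hps') hw, hps']
    have hslice : PySem.List.slice ([w1, w] : List (List Char)) (some (-1)) none = [w] := by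
      rw [PySem.List.slice_from_neg_one]
      norm_num
    simp only [pvGeo, hslice, join_single]
    norm_num
  · -- at least three labels: the n = 2 lookup is consulted first
    rw [List.concat_eq_append] at hts0
    have hts : ts ≠ [] := by rw [hts0]; simp
    have htslen : 0 < ts.length := List.length_pos_of_ne_nil hts
    rw [hps']
    simp only [pvGeo]
    rw [if_pos (by simp only [List.length_append, List.length_cons, List.length_nil]; push_cast; omega)]
    rw [show PySem.List.slice (ts ++ [w1, w]) (some (-2)) none
          = (ts ++ [w1, w]).drop ((ts ++ [w1, w]).length - 2) from
        PySem.List.slice_from_neg_ofNat _ 2 (by omega)]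
    rw [show (ts ++ [w1, w]).length - 2 = ts.length by simp]
    rw [List.drop_left, join_pair]
    by_cases hco : w1 = "co".toList ∧ w = "uk".toList
    · obtain ⟨rfl, rfl⟩ := hco
      have hends : PySem.Chars.endswith h ".co.uk".toList = true := by
        rw [show (".co.uk".toList : List Char) = ('.' :: "co".toList) ++ ('.' :: "uk".toList) by decide,
          PySem.Chars.endswith_iff]
        exact (suffix_two h _ _ (by decide) (by decide)).mpr ⟨ts, hts, hps'⟩
      rw [show pvGeoLoop h ((".co.uk".toList, "uk".toList) :: pvTail34)
            = some (some (String.ofList "uk".toList), String.ofList ("geo TLD ".toList ++ ".co.uk".toList)) by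
        simp only [pvGeoLoop, hends, if_true]]
      rw [show ("co".toList ++ '.' :: "uk".toList : List Char) = "co.uk".toList by decide]
      rw [show PySem.Dict.get? pvGeoBySuffix "co.uk".toList = some "uk".toList by
        set_option maxRecDepth 8192 in decide]
      show _ = some ((some (String.ofList "uk".toList),
        String.ofList ("geo TLD .".toList ++ "co.uk".toList)) : Option String × String)
      set_option maxRecDepth 8192 in decide
    · have hends : PySem.Chars.endswith h ".co.uk".toList = false := by
        rw [Bool.eq_false_iff]
        intro hends
        have hsuf := (PySem.Chars.endswith_iff _ _).mp hends
        rw [show (".co.uk".toList : List Char) = ('.' :: "co".toList) ++ ('.' :: "uk".toList) by decide] at hsuf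
        obtain ⟨rs, hrs, heq⟩ := (suffix_two h _ _ (by decide) (by decide)).mp hsuf
        exact hco (concat2_inj (hps'.symm.trans heq))
      rw [show pvGeoLoop h ((".co.uk".toList, "uk".toList) :: pvTail34) = pvGeoLoop h pvTail34 by
        simp only [pvGeoLoop, hends, Bool.false_eq_true, if_false]]
      rw [getB_two_none w1 w hw1 hco]
      rw [if_pos (by simp only [List.length_append, List.length_cons, List.length_nil]; push_cast; omega)]
      rw [show PySem.List.slice (ts ++ [w1, w]) (some (-1)) none
            = (ts ++ [w1, w]).drop ((ts ++ [w1, w]).length - 1) from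
          PySem.List.slice_from_neg_one _]
      rw [show ts ++ [w1, w] = (ts ++ [w1]) ++ [w] by simp, drop_concat_last, join_single]
      rw [one_label_eq h (ts ++ [w1]) w (by simp) hps hw]

-- the country branch of A, per table entry
theorem subSignal_country :
    ∀ s ∈ (["ar","au","at","be","br","bg","ca","cl","co","cz","dk","ee",
      "fi","fr","de","gr","hu","in","id","ie","it","jp","lv","lt",
      "lu","mx","nl","nz","no","pe","ph","pl","pt","ro","ru","sk",
      "si","es","se","ch","tr","ua","uk","us","ve","za"].map String.toList),
      PySem.Dict.get? pvSubSignal s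
        = some (some (String.ofList s), String.ofList ("market subdomain (".toList ++ s ++ ".)".toList)) := by
  set_option maxRecDepth 262144 in decide

theorem subSignal_lang :
    ∀ s ∈ (["en","es","pt","fr","de","it","ru","zh","ja","ar","nl","sv","no","da","fi","pl","tr","el","cs","ro"].map String.toList),
      s ∈ (["ar","au","at","be","br","bg","ca","cl","co","cz","dk","ee",
        "fi","fr","de","gr","hu","in","id","ie","it","jp","lv","lt",
        "lu","mx","nl","nz","no","pe","ph","pl","pt","ro","ru","sk",
        "si","es","se","ch","tr","ua","uk","us","ve","za"].map String.toList)
      ∨ PySem.Dict.get? pvSubSignal s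
          = some (none, String.ofList ("language-only subdomain (".toList ++ s ++ ".) — ambiguous".toList)) := by
  set_option maxRecDepth 262144 in decide

theorem subSignal_keys :
    ∀ k ∈ PySem.Dict.keys pvSubSignal,
      k ∈ (["ar","au","at","be","br","bg","ca","cl","co","cz","dk","ee",
        "fi","fr","de","gr","hu","in","id","ie","it","jp","lv","lt",
        "lu","mx","nl","nz","no","pe","ph","pl","pt","ro","ru","sk",
        "si","es","se","ch","tr","ua","uk","us","ve","za"].map String.toList)
      ∨ k ∈ (["en","es","pt","fr","de","it","ru","zh","ja","ar","nl","sv","no","da","fi","pl","tr","el","cs","ro"].map String.toList) := by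
  set_option maxRecDepth 262144 in decide

-- subdomain phase: A's two membership branches equal B's single table lookup
theorem sub_eq (parts : List (List Char)) :
    (if 3 ≤ parts.length then
      if pvCountryCodes.contains parts.headI then
        ((some (String.ofList parts.headI),
          String.ofList ("market subdomain (".toList ++ parts.headI ++ ".)".toList)) : Option String × String)
      else if pvLangOnly.contains parts.headI then
        (none, String.ofList ("language-only subdomain (".toList ++ parts.headI ++ ".) — ambiguous".toList))
      else (none, "generic TLD — ambiguous")
    else (none, "generic TLD — ambiguous"))
      = (pvSub parts).getD (none, "generic TLD — ambiguous") := by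
  unfold pvSub
  by_cases h3 : 3 ≤ parts.length
  · rw [if_pos h3, if_pos h3]
    set sub := parts.headI with hsub
    by_cases hc : pvCountryCodes.contains sub = true
    · have hmem : sub ∈ (["ar","au","at","be","br","bg","ca","cl","co","cz","dk","ee",
          "fi","fr","de","gr","hu","in","id","ie","it","jp","lv","lt",
          "lu","mx","nl","nz","no","pe","ph","pl","pt","ro","ru","sk",
          "si","es","se","ch","tr","ua","uk","us","ve","za"].map String.toList) := by
        have := (PySem.Set.contains_iff pvCountryCodes sub).mp hc
        exact (PySem.Set.mem_ofList _ _).mp this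
      rw [if_pos hc, subSignal_country sub hmem, Option.getD_some]
    · rw [if_neg hc]
      have hnc : sub ∉ (["ar","au","at","be","br","bg","ca","cl","co","cz","dk","ee",
          "fi","fr","de","gr","hu","in","id","ie","it","jp","lv","lt",
          "lu","mx","nl","nz","no","pe","ph","pl","pt","ro","ru","sk",
          "si","es","se","ch","tr","ua","uk","us","ve","za"].map String.toList) := by
        intro hmem
        exact hc ((PySem.Set.contains_iff pvCountryCodes sub).mpr
          ((PySem.Set.mem_ofList _ _).mpr hmem))
      by_cases hl : pvLangOnly.contains sub = true
      · have hmem : sub ∈ (["en","es","pt","fr","de","it","ru","zh","ja","ar","nl","sv","no","da","fi","pl","tr","el","cs","ro"].map String.toList) := by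
          have := (PySem.Set.contains_iff pvLangOnly sub).mp hl
          exact (PySem.Set.mem_ofList _ _).mp this
        rw [if_pos hl]
        rcases subSignal_lang sub hmem with hbad | hget
        · exact absurd hbad hnc
        · rw [hget, Option.getD_some]
      · rw [if_neg hl]
        have hnl : sub ∉ (["en","es","pt","fr","de","it","ru","zh","ja","ar","nl","sv","no","da","fi","pl","tr","el","cs","ro"].map String.toList) := by
          intro hmem
          exact hl ((PySem.Set.contains_iff pvLangOnly sub).mpr
            ((PySem.Set.mem_ofList _ _).mpr hmem))
        cases hg : PySem.Dict.get? pvSubSignal sub with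
        | none => rfl
        | some v =>
          exfalso
          have hkeys := PySem.Dict.mem_keys_of_mem_items _ (PySem.Dict.mem_items_of_get?_eq_some _ hg)
          rcases subSignal_keys sub hkeys with hk | hk
          · exact hnc hk
          · exact hnl hk
  · rw [if_neg h3, if_neg h3, Option.getD_none]

-- the tail branch of A, isolated
def pvTailBranch (parts : List (List Char)) : Option String × String :=
  if 3 ≤ parts.length then
    let sub := parts.headI
    if pvCountryCodes.contains sub then
      (some (String.ofList sub), String.ofList ("market subdomain (".toList ++ sub ++ ".)".toList))
    else if pvLangOnly.contains sub then
      (none, String.ofList ("language-only subdomain (".toList ++ sub ++ ".) — ambiguous".toList))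
    else (none, "generic TLD — ambiguous")
  else (none, "generic TLD — ambiguous")

theorem tail_eq_sub (parts : List (List Char)) :
    pvTailBranch parts = (pvSub parts).getD (none, "generic TLD — ambiguous") := by
  unfold pvTailBranch
  exact sub_eq parts

set_option maxRecDepth 65536 in
theorem unfoldA (host : String) :
    hostname_signal_py host
      = (match pvGeoLoop (pvLstripWWW (PySem.Chars.lower host.toList))
            (PySem.List.sorted (PySem.Dict.items pvGeoTlds) (fun kv => -(kv.1.length : Int))) with
         | some r => r
         | none => pvTailBranch (PySem.Chars.splitOn (pvLstripWWW (PySem.Chars.lower host.toList)) ['.'])) := rfl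

set_option maxRecDepth 65536 in
theorem unfoldB (host : String) :
    hostname_signal_py_alt host
      = (((pvGeo (PySem.Chars.splitOn (pvLstripWWW (PySem.Chars.lower host.toList)) ['.']) [2, 1]).orElse
          (fun _ => pvSub (PySem.Chars.splitOn (pvLstripWWW (PySem.Chars.lower host.toList)) ['.']))).getD
          (none, "generic TLD — ambiguous")) := rfl

-- ===== VERDICT (by name: the statement is the Claim_ definition above) =====
theorem hostname_signal_py_spec : Claim_equal_hostname_signal_py := by
  intro host _
  show hostname_signal_py host = hostname_signal_py_alt host
  rw [unfoldA, unfoldB, splitOn_eq_pvSplit, geo_eq]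
  cases pvGeo (pvSplit (pvLstripWWW (PySem.Chars.lower host.toList))) [2, 1] with
  | some r => rfl
  | none => exact tail_eq_sub _
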